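-- pv_equiv track=rewrite | github.com/zhangjiazhe/SADGN | distance_adj_gen.py | get_common_seq
-- ===== SOURCE A (Python) =====
-- def get_common_seq(best_path, threshold =1):
--     com_ls = []
--     pre = best_path[0]
--     length =1
--     for i, element in enumerate(best_path):
--         if i ==0:
--             continue
--         cur = best_path[i]
--         if cur[0] == pre[0] +1 and cur[1] == pre[1] +1 :
--             length = length +1
--         else:
--             com_ls.append(length)
--             length = 1
--         pre = cur
--     com_ls.append(length)
--     return list(filter(lambda num: True if threshold< num else False, com_ls))
-- ===== SOURCE B (Python) =====
-- def get_common_seq(best_path, threshold=1):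
--     n = len(best_path)
--     bounds = [i + 1 for i, (p, c) in enumerate(zip(best_path, best_path[1:]))
--               if not (c[0] == p[0] + 1 and c[1] == p[1] + 1)]
--     edges = [0] + bounds + [n]
--     runs = [b - a for a, b in zip(edges, edges[1:])]
--     return [r for r in runs if r > threshold]
-- ===== Notes on version B (the rewrite author's own statement) =====
-- stated objective: alternative
-- what changed: B replaces A's stateful loop (carrying previous point, current run length and an accumulator) by a stateless pipeline: an indicator over consecutive pairs gives cut positions, run lengths are differences of consecutive boundary indices, then the same filter.
import Mathlib
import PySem

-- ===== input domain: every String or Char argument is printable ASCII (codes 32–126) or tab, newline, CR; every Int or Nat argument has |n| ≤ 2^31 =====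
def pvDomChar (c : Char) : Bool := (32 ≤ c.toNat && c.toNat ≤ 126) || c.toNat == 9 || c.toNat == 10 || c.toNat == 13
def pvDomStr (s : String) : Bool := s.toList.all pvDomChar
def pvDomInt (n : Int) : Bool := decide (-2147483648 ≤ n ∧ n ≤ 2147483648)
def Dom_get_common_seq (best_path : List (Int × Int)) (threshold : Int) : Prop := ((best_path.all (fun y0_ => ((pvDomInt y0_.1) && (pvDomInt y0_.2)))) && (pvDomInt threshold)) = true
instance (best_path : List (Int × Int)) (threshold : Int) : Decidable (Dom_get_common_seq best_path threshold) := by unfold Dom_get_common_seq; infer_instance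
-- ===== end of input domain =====

-- B replaces A's stateful run-counting loop by a cut-points/edge-differences pipeline (alternative decomposition, same O(n) cost); Pre_ excludes the empty list, where A raises IndexError.


-- ===== PORT A =====
-- loop body of A (state: com_ls, pre, length; the i == 0 iteration is skipped)
def stepA (st : List Int × (Int × Int) × Int) (ie : Int × (Int × Int)) : List Int × (Int × Int) × Int :=
  if ie.1 = 0 then st
  else
    let cur := ie.2
    if cur.1 = st.2.1.1 + 1 ∧ cur.2 = st.2.1.2 + 1 then (st.1, cur, st.2.2 + 1)
    else (st.1 ++ [st.2.2], cur, 1)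

def get_common_seq (best_path : List (Int × Int)) (threshold : Int) : List Int :=
  match best_path with
  | [] => []   -- Python: best_path[0] raises IndexError here; excluded by Pre_
  | p0 :: _ =>
    let st := (PySem.List.enumerate best_path 0).foldl stepA ([], p0, (1 : Int))
    (st.1 ++ [st.2.2]).filter (fun num => threshold < num)

-- ===== PORT B =====
-- B's cut positions: i+1 for each non-diagonal consecutive pair, enumerated from s
def pvBounds (pl : List ((Int × Int) × (Int × Int))) (s : Int) : List Int :=
  (PySem.List.enumerate pl s).filterMap
    (fun ic => if ¬ (ic.2.2.1 = ic.2.1.1 + 1 ∧ ic.2.2.2 = ic.2.1.2 + 1) then some (ic.1 + 1) else none)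

-- differences of consecutive entries: [b - a for a, b in zip(l, l[1:])]
def pvDiffs (l : List Int) : List Int := (l.zip l.tail).map (fun ab => ab.2 - ab.1)

def get_common_seq_alt (best_path : List (Int × Int)) (threshold : Int) : List Int :=
  let n : Int := best_path.length
  let bounds := pvBounds (best_path.zip best_path.tail) 0
  let edges := 0 :: bounds ++ [n]
  let runs := pvDiffs edges
  runs.filter (fun r => threshold < r)

-- ===== PRECONDITION & SPEC =====
-- Pre_ excludes exactly the empty list, on which A raises IndexError at best_path[0].
def Pre_get_common_seq (best_path : List (Int × Int)) (threshold : Int) : Prop := best_path ≠ []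
instance (best_path : List (Int × Int)) (threshold : Int) : Decidable (Pre_get_common_seq best_path threshold) := by unfold Pre_get_common_seq; infer_instance
def pvWitness_get_common_seq : (List (Int × Int)) × Int := ([(0, 0), (1, 1), (3, 3)], 1)

def Spec_get_common_seq (best_path : List (Int × Int)) (threshold : Int) (out : List Int) : Prop := out = get_common_seq_alt best_path threshold
instance (best_path : List (Int × Int)) (threshold : Int) (out : List Int) : Decidable (Spec_get_common_seq best_path threshold out) := by unfold Spec_get_common_seq; infer_instance

-- ===== CLAIM (what is proved, stated in full; the proofs are below) =====
def Claim_equal_get_common_seq : Prop := ∀ (best_path : List (Int × Int)) (threshold : Int), Dom_get_common_seq best_path threshold → Pre_get_common_seq best_path threshold → Spec_get_common_seq best_path threshold (get_common_seq best_path threshold)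

-- ===== LEMMAS AND PROOFS =====

/-- Common specification: the run lengths, recursively. -/
def runsRec (pre : Int × Int) (rest : List (Int × Int)) (len : Int) : List Int :=
  match rest with
  | [] => [len]
  | c :: t =>
    if c.1 = pre.1 + 1 ∧ c.2 = pre.2 + 1 then runsRec c t (len + 1)
    else len :: runsRec c t 1

/-- A's fold (past index 0) produces `runsRec`. -/
theorem lemA (rest : List (Int × Int)) (s : Int) (hs : 1 ≤ s)
    (com : List Int) (pre : Int × Int) (len : Int) :
    ((PySem.List.enumerate rest s).foldl stepA (com, pre, len)).1 ++
      [((PySem.List.enumerate rest s).foldl stepA (com, pre, len)).2.2] =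
    com ++ runsRec pre rest len := by
  induction rest generalizing s com pre len with
  | nil => simp [PySem.List.enumerate_nil, runsRec]
  | cons c t ih =>
    have hne : ¬ ((s : Int) = 0) := by omega
    by_cases hb : c.1 = pre.1 + 1 ∧ c.2 = pre.2 + 1
    · simpa [PySem.List.enumerate_cons, stepA, hne, runsRec, hb] using
        ih (s + 1) (by omega) com c (len + 1)
    · simpa [PySem.List.enumerate_cons, stepA, hne, runsRec, hb] using
        ih (s + 1) (by omega) (com ++ [len]) c 1

theorem pvDiffs_cons_cons (a b : Int) (l : List Int) :
    pvDiffs (a :: b :: l) = (b - a) :: pvDiffs (b :: l) := rfl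

/-- B's edge-difference pipeline on a suffix produces `runsRec`. -/
theorem lemB (rest : List (Int × Int)) (pre : Int × Int) (s e n : Int)
    (hn : n = s + 1 + rest.length) :
    pvDiffs (e :: pvBounds ((pre :: rest).zip rest) s ++ [n]) =
      runsRec pre rest (s + 1 - e) := by
  induction rest generalizing pre s e with
  | nil =>
    simp only [List.length_nil] at hn
    simp [pvBounds, PySem.List.enumerate_nil, pvDiffs, runsRec]
    omega
  | cons c t ih =>
    have hn' : n = (s + 1) + 1 + t.length := by
      simp only [List.length_cons] at hn; push_cast at hn ⊢; omega
    by_cases hb : c.1 = pre.1 + 1 ∧ c.2 = pre.2 + 1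
    · have h := ih c (s + 1) e hn'
      rw [show (s + 1) + 1 - e = s + 1 - e + 1 by ring] at h
      simpa [pvBounds, PySem.List.enumerate_cons, hb, runsRec] using h
    · have h := ih c (s + 1) (s + 1) hn'
      rw [show (s + 1) + 1 - (s + 1) = (1 : Int) by ring] at h
      simp only [pvBounds, PySem.List.enumerate_cons, List.zip_cons_cons, List.filterMap_cons,
        hb, not_false_iff, ite_true, if_neg hb, runsRec, List.cons_append] at h ⊢
      rw [pvDiffs_cons_cons, h]
      simp [hb]

-- ===== VERDICT (by name: the statement is the Claim_ definition above) =====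
theorem get_common_seq_spec : Claim_equal_get_common_seq := by
  intro best_path threshold _ hpre
  unfold Spec_get_common_seq
  match best_path, hpre with
  | p0 :: rest, _ =>
    show get_common_seq (p0 :: rest) threshold = get_common_seq_alt (p0 :: rest) threshold
    unfold get_common_seq get_common_seq_alt
    simp only [PySem.List.enumerate_cons, List.foldl_cons, List.tail_cons]
    rw [show stepA ([], p0, (1 : Int)) (0, p0) = ([], p0, (1 : Int)) by simp [stepA]]
    rw [show (0 : Int) + 1 = 1 from rfl]
    rw [lemA rest 1 (le_refl 1) [] p0 1]
    have hB := lemB rest p0 0 0 (((p0 :: rest).length : Int))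
      (by simp only [List.length_cons]; push_cast; ring)
    rw [show (0 : Int) + 1 - 0 = 1 by ring] at hB
    rw [List.nil_append, ← hB]
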